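-- pv_equiv track=rewrite | github.com/chriswahlen/profit | scripts/name_detector.py | _collapse_acronyms
-- ===== SOURCE A (Python) =====
-- def _collapse_acronyms(tokens: list[str]) -> list[str]:
--     collapsed: list[str] = []
--     buffer: list[str] = []
--     for token in tokens:
--         if len(token) == 1:
--             buffer.append(token)
--             continue
--         if buffer:
--             collapsed.append("".join(buffer))
--             buffer.clear()
--         collapsed.append(token)
--     if buffer:
--         collapsed.append("".join(buffer))
--     return collapsed
-- ===== SOURCE B (Python) =====
-- def _collapse_acronyms(tokens: list[str]) -> list[str]:
--     # Run-scanning: find each maximal run of single-char tokens by index and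
--     # join it in one step; no buffer/flush state machine.
--     out: list[str] = []
--     n = len(tokens)
--     i = 0
--     while i < n:
--         if len(tokens[i]) != 1:
--             out.append(tokens[i])
--             i += 1
--         else:
--             j = i
--             while j < n and len(tokens[j]) == 1:
--                 j += 1
--             out.append("".join(tokens[i:j]))
--             i = j
--     return out
-- ===== Notes on version B (the rewrite author's own statement) =====
-- stated objective: alternative
-- what changed: Replaces A's buffer/flush accumulator state machine with index-based run scanning: each maximal run of single-char tokens is located with an inner scan and joined in one step, so no pending-buffer state or end-of-loop flush exists.
import Mathlib
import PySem

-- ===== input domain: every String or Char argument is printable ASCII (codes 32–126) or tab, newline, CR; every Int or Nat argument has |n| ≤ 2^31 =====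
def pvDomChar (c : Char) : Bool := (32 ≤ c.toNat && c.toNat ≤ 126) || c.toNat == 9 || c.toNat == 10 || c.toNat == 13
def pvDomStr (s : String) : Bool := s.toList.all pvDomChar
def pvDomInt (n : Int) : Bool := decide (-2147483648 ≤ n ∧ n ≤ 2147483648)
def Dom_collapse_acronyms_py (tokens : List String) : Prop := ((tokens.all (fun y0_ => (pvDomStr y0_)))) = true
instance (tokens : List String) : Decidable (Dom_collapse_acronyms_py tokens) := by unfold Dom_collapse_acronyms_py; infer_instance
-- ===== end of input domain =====

-- B replaces A's buffer/flush state machine by run scanning (recursion on maximal runs); alternative decomposition, same cost.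

-- ===== PORT A =====
-- the for-loop of A, with its (collapsed, buffer) state
def collapseGoA : List String → List String → List String → List String
  | [], collapsed, buffer =>
      if buffer.isEmpty then collapsed else collapsed ++ [PySem.Str.join "" buffer]
  | token :: rest, collapsed, buffer =>
      if PySem.Str.len token == 1 then
        collapseGoA rest collapsed (buffer ++ [token])
      else
        collapseGoA rest
          ((if buffer.isEmpty then collapsed else collapsed ++ [PySem.Str.join "" buffer]) ++ [token])
          []

def collapse_acronyms_py (tokens : List String) : List String :=
  collapseGoA tokens [] []

-- ===== PORT B =====
-- Source B's outer while-loop as recursion on runs; the inner index scan is takeWhile/dropWhile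
def collapse_acronyms_py_alt : List String → List String
  | [] => []
  | t :: ts =>
      if PySem.Str.len t == 1 then
        PySem.Str.join "" ((t :: ts).takeWhile (fun s => PySem.Str.len s == 1)) ::
          collapse_acronyms_py_alt ((t :: ts).dropWhile (fun s => PySem.Str.len s == 1))
      else
        t :: collapse_acronyms_py_alt ts
  termination_by l => l.length
  decreasing_by
  · rename_i hp
    simp only [List.dropWhile_cons, hp, if_true, List.length_cons]
    exact Nat.lt_succ_of_le (List.length_dropWhile_le _ ts)
  · simp

-- ===== PRECONDITION & SPEC =====
def Spec_collapse_acronyms_py (tokens : List String) (out : List String) : Prop := out = collapse_acronyms_py_alt tokens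
instance (tokens : List String) (out : List String) : Decidable (Spec_collapse_acronyms_py tokens out) := by unfold Spec_collapse_acronyms_py; infer_instance

-- ===== CLAIM (what is proved, stated in full; the proofs are below) =====
def Claim_equal_collapse_acronyms_py : Prop := ∀ (tokens : List String), Dom_collapse_acronyms_py tokens → Spec_collapse_acronyms_py tokens (collapse_acronyms_py tokens)

-- ===== LEMMAS AND PROOFS =====

theorem takeWhile_append_all {α : Type} (p : α → Bool) (l r : List α)
    (h : ∀ x ∈ l, p x = true) : (l ++ r).takeWhile p = l ++ r.takeWhile p := by
  induction l with
  | nil => simp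
  | cons a l ih =>
    simp only [List.cons_append, List.takeWhile_cons, h a (by simp)]
    simp [ih (fun x hx => h x (by simp [hx]))]

theorem dropWhile_append_all {α : Type} (p : α → Bool) (l r : List α)
    (h : ∀ x ∈ l, p x = true) : (l ++ r).dropWhile p = r.dropWhile p := by
  induction l with
  | nil => simp
  | cons a l ih =>
    simp only [List.cons_append, List.dropWhile_cons, h a (by simp)]
    exact ih (fun x hx => h x (by simp [hx]))

theorem alt_all_single (buf : List String)
    (h : ∀ s ∈ buf, (PySem.Str.len s == 1) = true) :
    collapse_acronyms_py_alt buf =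
      if buf.isEmpty then [] else [PySem.Str.join "" buf] := by
  cases buf with
  | nil => rw [collapse_acronyms_py_alt]; rfl
  | cons b bs =>
    have hb := h b (by simp)
    have htw : List.takeWhile (fun s => PySem.Str.len s == 1) (b :: bs) = b :: bs :=
      List.takeWhile_eq_self_iff.mpr h
    have hdw : List.dropWhile (fun s => PySem.Str.len s == 1) (b :: bs) = [] :=
      List.dropWhile_eq_nil_iff.mpr h
    rw [collapse_acronyms_py_alt, if_pos hb, htw, hdw, collapse_acronyms_py_alt]
    rfl

theorem alt_run_break (buf : List String) (t : String) (ts : List String)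
    (h : ∀ s ∈ buf, (PySem.Str.len s == 1) = true)
    (ht : ¬ (PySem.Str.len t == 1) = true) :
    collapse_acronyms_py_alt (buf ++ t :: ts) =
      (if buf.isEmpty then [] else [PySem.Str.join "" buf]) ++
        t :: collapse_acronyms_py_alt ts := by
  cases buf with
  | nil =>
    rw [List.nil_append, collapse_acronyms_py_alt, if_neg ht]
    rfl
  | cons b bs =>
    have hb := h b (by simp)
    have hbs : ∀ s ∈ bs, (PySem.Str.len s == 1) = true := fun s hs => h s (by simp [hs])
    have htw : List.takeWhile (fun s => PySem.Str.len s == 1) (b :: (bs ++ t :: ts))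
        = b :: bs := by
      rw [List.takeWhile_cons, if_pos hb, takeWhile_append_all _ _ _ hbs,
        List.takeWhile_cons, if_neg ht, List.append_nil]
    have hdw : List.dropWhile (fun s => PySem.Str.len s == 1) (b :: (bs ++ t :: ts))
        = t :: ts := by
      rw [List.dropWhile_cons, if_pos hb, dropWhile_append_all _ _ _ hbs,
        List.dropWhile_cons, if_neg ht]
    rw [List.cons_append, collapse_acronyms_py_alt, if_pos hb, htw, hdw,
      collapse_acronyms_py_alt, if_neg ht]
    rfl

theorem goA_eq (ts : List String) : ∀ (coll buf : List String),
    (∀ s ∈ buf, (PySem.Str.len s == 1) = true) →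
    collapseGoA ts coll buf = coll ++ collapse_acronyms_py_alt (buf ++ ts) := by
  induction ts with
  | nil =>
    intro coll buf h
    rw [List.append_nil, collapseGoA, alt_all_single buf h]
    split_ifs <;> simp
  | cons t ts ih =>
    intro coll buf h
    rw [collapseGoA]
    by_cases ht : (PySem.Str.len t == 1) = true
    · rw [if_pos ht]
      have h' : ∀ s ∈ buf ++ [t], (PySem.Str.len s == 1) = true := by
        intro s hs
        rcases List.mem_append.mp hs with hs | hs
        · exact h s hs
        · simp at hs; subst hs; exact ht
      rw [ih coll (buf ++ [t]) h', List.append_assoc]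
      simp
    · rw [if_neg ht, ih _ [] (by simp), alt_run_break buf t ts h ht]
      rw [List.nil_append]
      split_ifs <;> simp

-- ===== VERDICT (by name: the statement is the Claim_ definition above) =====
theorem collapse_acronyms_py_spec : Claim_equal_collapse_acronyms_py := by
  intro tokens _
  unfold Spec_collapse_acronyms_py collapse_acronyms_py
  rw [goA_eq tokens [] [] (by simp)]
  simp
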